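-- pv_equiv track=rewrite | github.com/ZeyadGabr1/Algorithm-Practice-Weekly | word_count_program/main.py | get_words_count
-- ===== SOURCE A (Python) =====
-- def get_words_count(text: str):
--     """A function to iterate through each letter in the text and count the number of words in the text."""
--
--     words_count = 0
--     in_word = False
--
--     for l in text:
--
--         if l.isalpha():
--             if not in_word:
--                 in_word = True
--                 words_count += 1
--
--         else:
--             in_word = False
--
--
--     return words_count
-- ===== SOURCE B (Python) =====
-- import itertools
--
-- def get_words_count(text: str):
--     """Count words as maximal runs of alphabetic characters, via groupby."""
--     return sum(1 for k, _ in itertools.groupby(text, key=str.isalpha) if k)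
-- ===== Notes on version B (the rewrite author's own statement) =====
-- stated objective: idiomatic
-- what changed: Replaces the manual in_word flag with itertools.groupby over str.isalpha: consecutive characters are grouped into runs and the alphabetic runs are counted.
import Mathlib
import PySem

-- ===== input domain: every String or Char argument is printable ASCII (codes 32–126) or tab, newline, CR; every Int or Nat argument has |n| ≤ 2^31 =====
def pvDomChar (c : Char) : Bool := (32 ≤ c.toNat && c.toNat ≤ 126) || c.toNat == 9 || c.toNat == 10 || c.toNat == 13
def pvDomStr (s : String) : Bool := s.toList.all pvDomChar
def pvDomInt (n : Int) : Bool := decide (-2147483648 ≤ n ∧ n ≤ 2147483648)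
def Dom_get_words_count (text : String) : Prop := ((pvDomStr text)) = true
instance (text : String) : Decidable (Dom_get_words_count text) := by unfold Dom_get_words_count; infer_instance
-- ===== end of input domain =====

-- B counts words via run-grouping (groupby); A keeps an in_word flag. Return values proved equal; no mutation involved.

-- ===== PORT A =====
-- literal port of A's loop: state (words_count, in_word), one step per character
def get_words_count (text : String) : Int :=
  (text.toList.foldl
    (fun (st : Int × Bool) l =>
      if PySem.Chars.isalpha l then
        if !st.2 then (st.1 + 1, true) else st
      else
        (st.1, false))
    (0, false)).1

-- ===== PORT B =====
-- port of Source B: group consecutive characters into maximal runs by isalpha and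
-- count the alphabetic runs (each recursive step consumes one whole run)
def pvCountAlphaRuns : List Char → Int
  | [] => 0
  | c :: cs =>
    if PySem.Chars.isalpha c then
      1 + pvCountAlphaRuns (cs.dropWhile PySem.Chars.isalpha)
    else
      pvCountAlphaRuns (cs.dropWhile (fun d => !PySem.Chars.isalpha d))
termination_by l => l.length
decreasing_by
  · exact Nat.lt_succ_of_le (List.length_dropWhile_le _ _)
  · exact Nat.lt_succ_of_le (List.length_dropWhile_le _ _)

def get_words_count_alt (text : String) : Int :=
  pvCountAlphaRuns text.toList

-- ===== PRECONDITION & SPEC =====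
def Spec_get_words_count (text : String) (out : Int) : Prop := out = get_words_count_alt text
instance (text : String) (out : Int) : Decidable (Spec_get_words_count text out) := by unfold Spec_get_words_count; infer_instance

-- ===== CLAIM (what is proved, stated in full; the proofs are below) =====
def Claim_equal_get_words_count : Prop := ∀ (text : String), Dom_get_words_count text → Spec_get_words_count text (get_words_count text)

-- ===== LEMMAS AND PROOFS =====

def pvStep (st : Int × Bool) (l : Char) : Int × Bool :=
  if PySem.Chars.isalpha l then
    if !st.2 then (st.1 + 1, true) else st
  else
    (st.1, false)

-- dropping a (possibly empty) non-alpha prefix does not change the run count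
theorem pvSkipNonAlpha (cs : List Char) :
    pvCountAlphaRuns (cs.dropWhile (fun d => !PySem.Chars.isalpha d)) = pvCountAlphaRuns cs := by
  cases cs with
  | nil => rfl
  | cons c cs =>
    by_cases h : PySem.Chars.isalpha c = true
    · simp [List.dropWhile, h]
    · simp only [List.dropWhile]
      simp [h, pvCountAlphaRuns]

theorem pvFoldl_invariant (l : List Char) :
    ∀ wc : Int,
      ((l.foldl pvStep (wc, false)).1 = wc + pvCountAlphaRuns l) ∧
      ((l.foldl pvStep (wc, true)).1 =
        wc + pvCountAlphaRuns (l.dropWhile PySem.Chars.isalpha)) := by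
  induction l with
  | nil => intro wc; simp [pvCountAlphaRuns]
  | cons c cs ih =>
    intro wc
    by_cases h : PySem.Chars.isalpha c = true
    · refine ⟨?_, ?_⟩
      · simp only [List.foldl_cons, pvStep, h]
        simp only [Bool.not_false, if_true]
        rw [(ih (wc + 1)).2]
        simp only [pvCountAlphaRuns, h, if_true]
        ring
      · simp only [List.foldl_cons, pvStep, h]
        simp only [Bool.not_true, Bool.false_eq_true, if_false, if_true]
        rw [(ih wc).2]
        simp [List.dropWhile, h]
    · refine ⟨?_, ?_⟩
      · simp only [List.foldl_cons, pvStep, if_neg h]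
        rw [(ih wc).1]
        simp only [pvCountAlphaRuns, if_neg h]
        rw [pvSkipNonAlpha]
      · simp only [List.foldl_cons, pvStep, if_neg h]
        rw [(ih wc).1]
        have : (c :: cs).dropWhile PySem.Chars.isalpha = c :: cs := by
          simp [List.dropWhile, h]
        rw [this]
        simp only [pvCountAlphaRuns, if_neg h]
        rw [pvSkipNonAlpha]

-- ===== VERDICT (by name: the statement is the Claim_ definition above) =====
theorem get_words_count_spec : Claim_equal_get_words_count := by
  intro text _
  unfold Spec_get_words_count get_words_count get_words_count_alt
  have h := (pvFoldl_invariant text.toList 0).1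
  simp only [zero_add] at h
  exact h
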